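-- pv_equiv track=rewrite | github.com/datvithanh/codeleague | interval.py | get_suspicious_users
-- ===== SOURCE A (Python) =====
-- def get_suspicious_users(interval):
--     users = [tmp[2] for tmp in interval]
--     user_di = {}
--     for u in users:
--         if u in user_di.keys():
--             user_di[u] +=1
--         else:
--             user_di[u] = 1
--
--     suspicious_users = []
--     max_order_propotion = 0
--     for k, v in user_di.items():
--         if v > max_order_propotion:
--             max_order_propotion = v
--             suspicious_users = [k]
--         else:
--             if v == max_order_propotion:
--                 suspicious_users.append(k)
--             else:
--                 pass
--
--     return suspicious_users
-- ===== SOURCE B (Python) =====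
-- def get_suspicious_users(interval):
--     users = [tmp[2] for tmp in interval]
--     max_count = max((users.count(u) for u in users), default=0)
--     return [u for u in dict.fromkeys(users) if users.count(u) == max_count]
-- ===== Notes on version B (the rewrite author's own statement) =====
-- stated objective: alternative
-- what changed: A's counting dict plus fused running-max-while-rebuilding-list loop is replaced by dict-free brute force: compute each user's frequency with list.count scans, take the maximum of those counts, and filter the order-preserving dedup (dict.fromkeys) by that count.
import Mathlib
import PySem

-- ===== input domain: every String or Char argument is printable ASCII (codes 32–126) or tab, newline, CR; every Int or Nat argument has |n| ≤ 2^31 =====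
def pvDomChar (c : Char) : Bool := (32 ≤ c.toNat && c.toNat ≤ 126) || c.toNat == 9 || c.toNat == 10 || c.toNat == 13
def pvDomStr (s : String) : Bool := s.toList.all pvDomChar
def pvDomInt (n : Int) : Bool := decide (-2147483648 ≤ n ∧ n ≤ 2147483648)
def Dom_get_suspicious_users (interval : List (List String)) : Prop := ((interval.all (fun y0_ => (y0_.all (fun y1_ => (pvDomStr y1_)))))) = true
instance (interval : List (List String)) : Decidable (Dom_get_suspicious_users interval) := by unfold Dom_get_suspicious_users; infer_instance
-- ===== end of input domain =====

-- B drops A's counting dict and fused running-max loop entirely: it brute-forces each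
-- user's frequency with list.count, takes the max of those counts, and filters the
-- order-preserving dedup (dict.fromkeys) by that count (alternative algorithm, not faster).


-- ===== PORT A =====
-- users = [tmp[2] for tmp in interval]; tmp[2] raises IndexError on short rows (excluded by
-- Pre_; the .getD "" default is never reached inside Pre_).
def get_suspicious_users (interval : List (List String)) : List String :=
  let users := interval.map (fun tmp => (PySem.List.pyGet? tmp 2).getD "")
  let user_di : PySem.Dict String Int :=
    users.foldl (fun d u => if d.contains u then d.modify u 0 (· + 1) else d.insert u 1)
      PySem.Dict.empty
  -- for k, v in user_di.items(): running max + list, fused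
  (user_di.items.foldl
    (fun (st : List String × Int) kv =>
      if kv.2 > st.2 then ([kv.1], kv.2)
      else if kv.2 == st.2 then (st.1 ++ [kv.1], st.2)
      else st)
    ([], 0)).1

-- ===== PORT B =====
-- max((users.count(u) for u in users), default=0); dict.fromkeys(users) = PySem.List.dedup.
def get_suspicious_users_alt (interval : List (List String)) : List String :=
  let users := interval.map (fun tmp => (PySem.List.pyGet? tmp 2).getD "")
  let max_count :=
    (PySem.List.max? (users.map (fun u => (PySem.List.count users u : Int))) (fun x => x)).getD 0
  (PySem.List.dedup users).filter
    (fun u => (PySem.List.count users u : Int) == max_count)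

-- ===== PRECONDITION & SPEC =====
-- Pre_ excludes exactly the inputs where A raises IndexError: a row with fewer than 3 entries.
def Pre_get_suspicious_users (interval : List (List String)) : Prop :=
  ∀ row ∈ interval, 3 ≤ row.length
instance (interval : List (List String)) : Decidable (Pre_get_suspicious_users interval) := by unfold Pre_get_suspicious_users; infer_instance
def pvWitness_get_suspicious_users : List (List String) :=
  [["1", "a", "u1"], ["2", "b", "u2"], ["3", "c", "u1"]]

def Spec_get_suspicious_users (interval : List (List String)) (out : List String) : Prop := out = get_suspicious_users_alt interval
instance (interval : List (List String)) (out : List String) : Decidable (Spec_get_suspicious_users interval out) := by unfold Spec_get_suspicious_users; infer_instance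

-- ===== CLAIM (what is proved, stated in full; the proofs are below) =====
def Claim_equal_get_suspicious_users : Prop := ∀ (interval : List (List String)), Dom_get_suspicious_users interval → Pre_get_suspicious_users interval → Spec_get_suspicious_users interval (get_suspicious_users interval)

-- ===== LEMMAS AND PROOFS =====

-- A's dict-building step is exactly the Counter step.
theorem gsu_stepA_eq_modify (d : PySem.Dict String Int) (u : String) :
    (if d.contains u then d.modify u 0 (· + 1) else d.insert u 1) = d.modify u 0 (· + 1) := by
  by_cases h : d.contains u = true
  · simp [h]
  · simp only [Bool.not_eq_true] at h
    simp [h, PySem.Dict.insert, PySem.Dict.modify, pysem]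

theorem gsu_dictA_eq_counter (users : List String) :
    users.foldl (fun d u => if d.contains u then d.modify u 0 (· + 1) else d.insert u 1)
      PySem.Dict.empty = PySem.Dict.counter users := by
  rw [PySem.Dict.counter_eq_foldl]
  have : (fun (d : PySem.Dict String Int) u =>
      if d.contains u then d.modify u 0 (· + 1) else d.insert u 1)
      = (fun (d : PySem.Dict String Int) u => d.modify u 0 (· + 1)) := by
    funext d u; exact gsu_stepA_eq_modify d u
  rw [this]

-- The heart of the A side: A's fused loop over any items list equals filter-by-final-max.
theorem gsu_fused_eq (l : List (String × Int)) (acc : List String) (m : Int) :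
    (l.foldl
      (fun (st : List String × Int) kv =>
        if kv.2 > st.2 then ([kv.1], kv.2)
        else if kv.2 == st.2 then (st.1 ++ [kv.1], st.2)
        else st)
      (acc, m)).1
    = (if l.foldl (fun a p => max a p.2) m = m then acc else []) ++
      (l.filter (fun p => p.2 == l.foldl (fun a p => max a p.2) m)).map (·.1) := by
  induction l generalizing acc m with
  | nil => simp
  | cons p t ih =>
    obtain ⟨k, v⟩ := p
    have hub : max m v ≤ t.foldl (fun a p => max a p.2) (max m v) :=
      (PySem.List.le_foldl_max_int t (·.2) (max m v)).1
    simp only [List.foldl_cons, List.filter_cons]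
    rcases lt_trichotomy m v with hv | hv | hv
    · -- v > m : reset
      have hmv : max m v = v := max_eq_right hv.le
      rw [if_pos hv, ih]
      simp only [hmv] at hub ⊢
      have hMm : t.foldl (fun a p => max a p.2) v ≠ m := by omega
      rw [if_neg hMm]
      by_cases hMv : t.foldl (fun a p => max a p.2) v = v
      · simp [hMv]
      · simp [hMv, Ne.symm hMv]
    · -- v = m : append
      cases hv
      rw [if_neg (lt_irrefl m), if_pos (by simp), ih]
      simp only [max_self] at hub ⊢
      by_cases hM : t.foldl (fun a p => max a p.2) m = m
      · simp [hM]
      · simp [hM, Ne.symm hM]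
    · -- v < m : skip
      have hmv : max m v = m := max_eq_left hv.le
      rw [if_neg (by omega), if_neg (by simp; omega), ih]
      simp only [hmv] at hub ⊢
      have hvM : v ≠ t.foldl (fun a p => max a p.2) m := by omega
      simp [hvM]

-- Two Int lists with the same members have the same running max from 0.
theorem gsu_foldl_max_eq_of_mem_iff (l₁ l₂ : List Int)
    (h : ∀ x, x ∈ l₁ ↔ x ∈ l₂) :
    l₁.foldl max 0 = l₂.foldl max 0 := by
  have key : ∀ (a b : List Int), (∀ x, x ∈ a → x ∈ b) → a.foldl max 0 ≤ b.foldl max 0 := by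
    intro a b hab
    rcases PySem.List.foldl_max_mem a 0 with h0 | hm
    · rw [h0]; exact (PySem.List.le_foldl_max b 0).1
    · exact (PySem.List.le_foldl_max b 0).2 _ (hab _ hm)
  exact le_antisymm (key _ _ fun x => (h x).1) (key _ _ fun x => (h x).2)

-- max(list, default=0) is the running max from 0 when all elements are nonnegative.
theorem gsu_maxD_eq_foldl (l : List Int) (h : ∀ x ∈ l, 0 ≤ x) :
    ((PySem.List.max? l (fun x => x)).getD 0) = l.foldl max 0 := by
  cases l with
  | nil => simp [PySem.List.max?]
  | cons x t =>
    rw [PySem.List.max?_id_cons]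
    have hx : max 0 x = x := max_eq_right (h x (by simp))
    simp [hx]

-- ===== VERDICT (by name: the statement is the Claim_ definition above) =====
theorem get_suspicious_users_spec : Claim_equal_get_suspicious_users := by
  intro interval _ _
  unfold Spec_get_suspicious_users get_suspicious_users get_suspicious_users_alt
  simp only []
  set users := interval.map (fun tmp => (PySem.List.pyGet? tmp 2).getD "") with husers
  rw [gsu_dictA_eq_counter, gsu_fused_eq, PySem.Dict.items_counter,
    ← PySem.List.dedup_eq_ofList]
  have hMB : (PySem.List.max? (users.map (fun u => (PySem.List.count users u : Int)))
        (fun x => x)).getD 0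
      = ((PySem.List.dedup users).map (fun u => (PySem.List.count users u : Int))).foldl max 0 := by
    rw [gsu_maxD_eq_foldl]
    · exact gsu_foldl_max_eq_of_mem_iff _ _ (by
        intro x
        simp only [List.mem_map, PySem.List.mem_dedup])
    · intro x hx
      rcases List.mem_map.1 hx with ⟨u, _, rfl⟩
      positivity
  rw [hMB]
  have hMA : ((PySem.List.dedup users).map
        (fun k => (k, (users.count k : Int)))).foldl (fun a p => max a p.2) 0
      = ((PySem.List.dedup users).map (fun u => (PySem.List.count users u : Int))).foldl max 0 := by
    rw [List.foldl_map, List.foldl_map]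
    simp [PySem.List.count_eq]
  rw [hMA]
  rw [List.filter_map, List.map_map]
  simp [Function.comp_def]
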